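-- pv_equiv track=rewrite | github.com/barmaleii77-hub/pneumo2 | pneumo2_R31CN_HF8_repo_root/pneumo_solver_ui/calibration/param_staging_v3_influence.py | _cumulative_ranges
-- ===== SOURCE A (Python) =====
-- from typing import Any, Dict, List, Optional, Tuple
--
-- def _cumulative_ranges(fit_ranges: Dict[str, Any], stages: List[List[str]]) -> List[Dict[str, Any]]:
--     out: List[Dict[str, Any]] = []
--     acc: Dict[str, Any] = {}
--     for stg in stages:
--         for p in stg:
--             if p in fit_ranges:
--                 acc[p] = fit_ranges[p]
--         out.append(dict(acc))
--     return out
-- ===== SOURCE B (Python) =====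
-- def _cumulative_ranges(fit_ranges, stages):
--     return [
--         {p: fit_ranges[p] for stg in stages[:i + 1] for p in stg if p in fit_ranges}
--         for i in range(len(stages))
--     ]
-- ===== Notes on version B (the rewrite author's own statement) =====
-- stated objective: alternative
-- what changed: B replaces A's mutable accumulator carried across stages by an independent per-index dict comprehension that rebuilds each snapshot from the flattened prefix stages[:i+1].
import Mathlib
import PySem

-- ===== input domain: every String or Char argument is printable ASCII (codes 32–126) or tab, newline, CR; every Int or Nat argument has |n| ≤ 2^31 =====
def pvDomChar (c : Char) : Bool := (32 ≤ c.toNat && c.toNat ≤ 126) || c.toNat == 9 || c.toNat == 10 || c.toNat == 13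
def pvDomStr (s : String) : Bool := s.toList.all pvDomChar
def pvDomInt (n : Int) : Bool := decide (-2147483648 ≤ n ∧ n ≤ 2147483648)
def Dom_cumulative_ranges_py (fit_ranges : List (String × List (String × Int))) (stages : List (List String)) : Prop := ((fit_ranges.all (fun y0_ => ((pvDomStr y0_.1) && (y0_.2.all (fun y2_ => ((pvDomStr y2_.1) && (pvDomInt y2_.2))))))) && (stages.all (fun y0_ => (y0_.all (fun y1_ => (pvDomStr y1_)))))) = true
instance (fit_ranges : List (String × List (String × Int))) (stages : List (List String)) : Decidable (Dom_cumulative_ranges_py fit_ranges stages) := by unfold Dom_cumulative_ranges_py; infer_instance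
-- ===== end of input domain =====

-- B rebuilds every snapshot independently from the flattened prefix stages[:i+1]
-- (per-index dict comprehension) instead of A's accumulator mutated across stages;
-- same values, a different decomposition (objective: alternative).

-- ===== PORT A =====
-- shared one-step update: 'if p in fit_ranges: acc[p] = fit_ranges[p]' (identical line in both Pythons)
def pvIns (fr : PySem.Dict String (List (String × Int)))
    (acc : PySem.Dict String (List (String × Int))) (p : String) :
    PySem.Dict String (List (String × Int)) :=
  match fr.get? p with
  | some v => acc.insert p v
  | none => acc

def cumulative_ranges_py (fit_ranges : List (String × List (String × Int))) (stages : List (List String)) : List (List (String × List (String × Int))) :=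
  let fr := PySem.Dict.mk fit_ranges
  (stages.foldl
    (fun (st : List (List (String × List (String × Int))) × PySem.Dict String (List (String × Int))) stg =>
      let acc := stg.foldl (pvIns fr) st.2
      (st.1 ++ [acc.items], acc))
    ([], PySem.Dict.empty)).1

-- ===== PORT B =====
def cumulative_ranges_py_alt (fit_ranges : List (String × List (String × Int))) (stages : List (List String)) : List (List (String × List (String × Int))) :=
  let fr := PySem.Dict.mk fit_ranges
  (PySem.List.pyRange 0 stages.length 1).map (fun i =>
    (((PySem.List.slice stages none (some (i + 1))).flatMap id).foldl
      (pvIns fr) PySem.Dict.empty).items)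

-- ===== PRECONDITION & SPEC =====
def Spec_cumulative_ranges_py (fit_ranges : List (String × List (String × Int))) (stages : List (List String)) (out : List (List (String × List (String × Int)))) : Prop := out = cumulative_ranges_py_alt fit_ranges stages
instance (fit_ranges : List (String × List (String × Int))) (stages : List (List String)) (out : List (List (String × List (String × Int)))) : Decidable (Spec_cumulative_ranges_py fit_ranges stages out) := by unfold Spec_cumulative_ranges_py; infer_instance

-- ===== CLAIM (what is proved, stated in full; the proofs are below) =====
def Claim_equal_cumulative_ranges_py : Prop := ∀ (fit_ranges : List (String × List (String × Int))) (stages : List (List String)), Dom_cumulative_ranges_py fit_ranges stages → Spec_cumulative_ranges_py fit_ranges stages (cumulative_ranges_py fit_ranges stages)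

-- ===== LEMMAS AND PROOFS =====

-- B's port, rewritten in Nat form: the i-th snapshot is a fold over the flattened prefix.
lemma alt_eq (fit_ranges : List (String × List (String × Int))) (stages : List (List String)) :
    cumulative_ranges_py_alt fit_ranges stages =
      (List.range stages.length).map (fun k =>
        (((stages.take (k + 1)).flatMap id).foldl (pvIns (PySem.Dict.mk fit_ranges)) PySem.Dict.empty).items) := by
  unfold cumulative_ranges_py_alt
  rw [PySem.List.pyRange_one]
  simp only [Int.sub_zero, Int.toNat_natCast, List.map_map]
  refine List.map_congr_left (fun k _ => ?_)
  have : (0 : Int) + (k : Int) + 1 = ((k + 1 : Nat) : Int) := by push_cast; ring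
  simp only [Function.comp, this, PySem.List.slice_to_natCast]

-- A's loop invariant: the collected list is the per-prefix snapshots, started from any acc.
lemma a_loop (fr : PySem.Dict String (List (String × Int))) :
    ∀ (stages : List (List String)) (out0 : List (List (String × List (String × Int))))
      (acc : PySem.Dict String (List (String × Int))),
      (stages.foldl
        (fun (st : List (List (String × List (String × Int))) × PySem.Dict String (List (String × Int))) stg =>
          let acc' := stg.foldl (pvIns fr) st.2
          (st.1 ++ [acc'.items], acc'))
        (out0, acc)).1
      = out0 ++ (List.range stages.length).map (fun k =>
          (((stages.take (k + 1)).flatMap id).foldl (pvIns fr) acc).items) := by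
  intro stages
  induction stages with
  | nil => intro out0 acc; simp
  | cons s rest ih =>
    intro out0 acc
    simp only [List.foldl_cons]
    rw [ih]
    rw [List.length_cons, List.range_succ_eq_map]
    simp only [List.map_cons, List.map_map]
    rw [List.append_assoc]
    congr 1
    rw [List.singleton_append]
    congr 1
    · simp
    · refine List.map_congr_left (fun k _ => ?_)
      simp [Function.comp, List.foldl_append]

-- ===== VERDICT (by name: the statement is the Claim_ definition above) =====
theorem cumulative_ranges_py_spec : Claim_equal_cumulative_ranges_py := by
  intro fit_ranges stages _
  unfold Spec_cumulative_ranges_py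
  rw [alt_eq]
  unfold cumulative_ranges_py
  rw [a_loop]
  simp
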